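-- pv_equiv track=rewrite | github.com/grahama1970/agent-skills | skills/movie-ingest/movie_ingest.py | infer_emotion_from_tags
-- ===== SOURCE A (Python) =====
-- from typing import Optional
-- from collections import Counter
--
-- TAG_TO_EMOTION = {
--     "rage": "rage",
--     "rage_candidate": "rage",
--     "anger": "anger",
--     "anger_candidate": "anger",
--     "shout": "anger",
--     "laugh": "humor",
--     "cry": "regret",
--     "sob": "regret",
--     "sigh": "regret",
--     "whisper": "respect",
--     "whisper_candidate": "respect",
--     "breath": "respect",
-- }
--
-- def infer_emotion_from_tags(tags: list[str], fallback: Optional[str] = None) -> Optional[str]: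
--     if fallback:
--         return fallback.lower()
--     mapped = [TAG_TO_EMOTION.get(tag.lower()) for tag in tags]
--     mapped = [m for m in mapped if m]
--     if not mapped:
--         return None
--     counts = Counter(mapped)
--     priority = ["rage", "anger", "humor", "regret", "respect"]
--     sorted_emotions = sorted(
--         counts.keys(),
--         key=lambda e: (-counts[e], priority.index(e) if e in priority else len(priority)),
--     )
--     return sorted_emotions[0]
-- ===== SOURCE B (Python) =====
-- from typing import Optional
--
-- TAG_TO_EMOTION = {
--     "rage": "rage",
--     "rage_candidate": "rage",
--     "anger": "anger",
--     "anger_candidate": "anger",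
--     "shout": "anger",
--     "laugh": "humor",
--     "cry": "regret",
--     "sob": "regret",
--     "sigh": "regret",
--     "whisper": "respect",
--     "whisper_candidate": "respect",
--     "breath": "respect",
-- }
--
-- def infer_emotion_from_tags(tags: list[str], fallback: Optional[str] = None) -> Optional[str]:
--     if fallback:
--         return fallback.lower()
--     counts = {}
--     for tag in tags:
--         emotion = TAG_TO_EMOTION.get(tag.lower())
--         if emotion:
--             counts[emotion] = counts.get(emotion, 0) + 1
--     if not counts:
--         return None
--     best = None
--     best_count = 0
--     for emotion in ["rage", "anger", "humor", "regret", "respect"]: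
--         c = counts.get(emotion, 0)
--         if c > best_count:
--             best = emotion
--             best_count = c
--     return best
-- ===== Notes on version B (the rewrite author's own statement) =====
-- stated objective: simpler
-- what changed: Replaces the Counter + sorted-by-(-count, priority-index) pipeline with a single counting pass over the tags into a plain dict followed by a linear strictly-greater argmax scan over the fixed priority list (earliest priority wins ties), with no sort and no intermediate mapped list.
import Mathlib
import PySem

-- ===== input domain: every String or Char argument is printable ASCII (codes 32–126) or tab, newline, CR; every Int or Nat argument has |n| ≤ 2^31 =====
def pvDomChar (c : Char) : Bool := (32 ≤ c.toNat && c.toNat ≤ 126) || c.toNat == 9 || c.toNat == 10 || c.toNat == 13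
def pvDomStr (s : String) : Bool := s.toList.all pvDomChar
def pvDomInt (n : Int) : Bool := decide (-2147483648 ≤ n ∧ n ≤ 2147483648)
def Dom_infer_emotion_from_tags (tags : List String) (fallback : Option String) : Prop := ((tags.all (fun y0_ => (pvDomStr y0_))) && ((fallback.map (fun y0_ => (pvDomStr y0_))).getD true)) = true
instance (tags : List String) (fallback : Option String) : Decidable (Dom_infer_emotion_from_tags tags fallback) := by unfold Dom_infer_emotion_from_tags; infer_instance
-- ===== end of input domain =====

-- B replaces Counter + sorted-by-(−count, priority-index) with one counting pass and a linear
-- strictly-greater argmax scan over the fixed priority list (objective: simpler, same result).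


-- module constant TAG_TO_EMOTION (shared context of both implementations)
def pvTAG : PySem.Dict String String := PySem.Dict.ofList
  [("rage","rage"),("rage_candidate","rage"),("anger","anger"),("anger_candidate","anger"),
   ("shout","anger"),("laugh","humor"),("cry","regret"),("sob","regret"),("sigh","regret"),
   ("whisper","respect"),("whisper_candidate","respect"),("breath","respect")]

def pvPriority : List String := ["rage", "anger", "humor", "regret", "respect"]

-- ===== PORT A =====
-- mapped = [TAG_TO_EMOTION.get(tag.lower()) for tag in tags]
def pvA_mapped (tags : List String) : List (Option String) :=
  tags.map (fun tag => pvTAG.get? (PySem.Str.lower tag))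

-- mapped = [m for m in mapped if m]   (truthiness of Optional[str]: not None and not "")
def pvA_mapped2 (tags : List String) : List String :=
  (pvA_mapped tags).filterMap (fun m => match m with
    | some s => if s = "" then none else some s
    | none => none)

def pvA_body (tags : List String) : Option String :=
  let mapped := pvA_mapped2 tags
  if mapped = [] then none
  else
    let counts := PySem.Dict.counter mapped
    let sorted_emotions := PySem.List.sorted2 counts.keys
      (fun e => -(counts.getD e 0))
      (fun e => match PySem.List.index? pvPriority e with
        | some i => (i : Int)
        | none => (pvPriority.length : Int)) false
    PySem.List.pyGet? sorted_emotions 0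

def infer_emotion_from_tags (tags : List String) (fallback : Option String) : Option String :=
  match fallback with
  | some f => if f ≠ "" then some (PySem.Str.lower f) else pvA_body tags
  | none => pvA_body tags

-- ===== PORT B =====
-- counts[emotion] = counts.get(emotion, 0) + 1 for each mapped tag
def pvB_counts (tags : List String) : PySem.Dict String Int :=
  tags.foldl (fun d tag =>
    match pvTAG.get? (PySem.Str.lower tag) with
    | some e => if e ≠ "" then d.insert e (d.getD e 0 + 1) else d
    | none => d) PySem.Dict.empty

-- walk the priority list, keep the first emotion with a strictly larger count
def pvB_body (tags : List String) : Option String :=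
  let counts := pvB_counts tags
  if counts.size = 0 then none
  else
    (pvPriority.foldl (fun (st : Option String × Int) e =>
      let c := counts.getD e 0
      if st.2 < c then (some e, c) else st) (none, 0)).1

def infer_emotion_from_tags_alt (tags : List String) (fallback : Option String) : Option String :=
  match fallback with
  | some f => if f ≠ "" then some (PySem.Str.lower f) else pvB_body tags
  | none => pvB_body tags

-- ===== PRECONDITION & SPEC =====
def Spec_infer_emotion_from_tags (tags : List String) (fallback : Option String) (out : Option String) : Prop := out = infer_emotion_from_tags_alt tags fallback
instance (tags : List String) (fallback : Option String) (out : Option String) : Decidable (Spec_infer_emotion_from_tags tags fallback out) := by unfold Spec_infer_emotion_from_tags; infer_instance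

-- ===== CLAIM (what is proved, stated in full; the proofs are below) =====
def Claim_equal_infer_emotion_from_tags : Prop := ∀ (tags : List String) (fallback : Option String), Dom_infer_emotion_from_tags tags fallback → Spec_infer_emotion_from_tags tags fallback (infer_emotion_from_tags tags fallback)

-- ===== LEMMAS AND PROOFS =====

-- priority index of an emotion, as A's sort key computes it
def pvIdx (e : String) : Int :=
  match PySem.List.index? pvPriority e with
  | some i => (i : Int)
  | none => (pvPriority.length : Int)

-- linearisation of A's lexicographic sort key (-count, index): both components in one Int
def pvK (l : List String) (e : String) : Int := -6 * (l.count e : Int) + pvIdx e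

lemma pvA_key2_eq (e : String) :
    (match PySem.List.index? pvPriority e with
     | some i => (i : Int)
     | none => (pvPriority.length : Int)) = pvIdx e := rfl

lemma pvIdx_bounds (e : String) : 0 ≤ pvIdx e ∧ pvIdx e ≤ 5 := by
  unfold pvIdx
  cases h : PySem.List.index? pvPriority e with
  | none => norm_num [pvPriority]
  | some i =>
    obtain ⟨hk, -, -⟩ := PySem.List.getElem_of_index?_eq_some h
    have hk5 : i < 5 := by simpa [pvPriority] using hk
    constructor <;> simp <;> omega

-- A's lexicographic comparator equals the linear comparator on pvK
lemma pvComp_eq (l : List String) :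
    (fun a b : String =>
      decide (-((PySem.Dict.counter l).getD a 0) < -((PySem.Dict.counter l).getD b 0)) ||
        (!decide (-((PySem.Dict.counter l).getD b 0) < -((PySem.Dict.counter l).getD a 0)) &&
          decide ((match PySem.List.index? pvPriority a with
                   | some i => (i : Int)
                   | none => (pvPriority.length : Int)) <
                  (match PySem.List.index? pvPriority b with
                   | some i => (i : Int)
                   | none => (pvPriority.length : Int)))))
    = (fun a b : String => decide (pvK l a < pvK l b)) := by
  funext a b
  obtain ⟨ha0, ha5⟩ := pvIdx_bounds a
  obtain ⟨hb0, hb5⟩ := pvIdx_bounds b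
  simp only [PySem.Dict.getD_counter, pvA_key2_eq]
  rw [Bool.eq_iff_iff]
  simp only [Bool.or_eq_true, Bool.and_eq_true, Bool.not_eq_true', decide_eq_true_eq,
    decide_eq_false_iff_not, pvK]
  omega

-- A's sorted2 call, rephrased with the linear comparator
lemma sorted2_eq_foldlK (l keys : List String) :
    PySem.List.sorted2 keys (fun e => -((PySem.Dict.counter l).getD e 0))
      (fun e => match PySem.List.index? pvPriority e with
        | some i => (i : Int)
        | none => (pvPriority.length : Int)) false
    = keys.foldl (fun acc x =>
        PySem.List.insertBy (fun a b => decide (pvK l a < pvK l b)) x acc) [] := by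
  show keys.foldl (fun acc x => PySem.List.insertBy (fun a b : String =>
      decide (-((PySem.Dict.counter l).getD a 0) < -((PySem.Dict.counter l).getD b 0)) ||
        (!decide (-((PySem.Dict.counter l).getD b 0) < -((PySem.Dict.counter l).getD a 0)) &&
          decide ((match PySem.List.index? pvPriority a with
                   | some i => (i : Int)
                   | none => (pvPriority.length : Int)) <
                  (match PySem.List.index? pvPriority b with
                   | some i => (i : Int)
                   | none => (pvPriority.length : Int))))) x acc) [] = _
  rw [pvComp_eq l]

lemma head?_insertBy {α : Type} (before : α → α → Bool) (x : α) (acc : List α) :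
    (PySem.List.insertBy before x acc).head? =
      some (match acc.head? with | none => x | some m => if before x m then x else m) := by
  cases acc with
  | nil => rfl
  | cons y ys => simp only [PySem.List.insertBy]; split_ifs <;> simp_all

lemma mem_foldl_insertBy {α : Type} (before : α → α → Bool) :
    ∀ (xs acc : List α) (y : α),
      y ∈ xs.foldl (fun acc x => PySem.List.insertBy before x acc) acc ↔ (y ∈ acc ∨ y ∈ xs) := by
  intro xs
  induction xs with
  | nil => simp
  | cons x xs ih =>
    intro acc y
    simp only [List.foldl_cons, ih, PySem.List.mem_insertBy, List.mem_cons]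
    tauto

lemma foldl_insertBy_head_min {α : Type} (f : α → Int) :
    ∀ (xs acc : List α),
      (∀ m, acc.head? = some m → ∀ y ∈ acc, f m ≤ f y) →
      ∀ m, (xs.foldl (fun acc x => PySem.List.insertBy (fun a b => decide (f a < f b)) x acc) acc).head? = some m →
      ∀ y, (y ∈ acc ∨ y ∈ xs) → f m ≤ f y := by
  intro xs
  induction xs with
  | nil =>
    intro acc hacc m hm y hy
    rcases hy with hy | hy
    · exact hacc m hm y hy
    · simp at hy
  | cons x xs ih =>
    intro acc hacc m hm y hy
    have hacc' : ∀ m', (PySem.List.insertBy (fun a b => decide (f a < f b)) x acc).head? = some m' →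
        ∀ z ∈ PySem.List.insertBy (fun a b => decide (f a < f b)) x acc, f m' ≤ f z := by
      intro m' hm' z hz
      rw [head?_insertBy] at hm'
      rw [PySem.List.mem_insertBy] at hz
      cases acc with
      | nil =>
        simp at hm'
        rcases hz with rfl | hz
        · simp [← hm']
        · simp at hz
      | cons a as =>
        have hmin : ∀ z ∈ a :: as, f a ≤ f z := hacc a rfl
        simp only [List.head?_cons] at hm'
        by_cases hfx : f x < f a
        · simp [hfx] at hm'
          subst hm'
          rcases hz with rfl | hz
          · exact le_refl _
          · exact le_of_lt (lt_of_lt_of_le hfx (hmin z hz))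
        · simp [hfx] at hm'
          subst hm'
          rcases hz with rfl | hz
          · exact le_of_not_gt hfx
          · exact hmin z hz
    have hy' : y ∈ PySem.List.insertBy (fun a b => decide (f a < f b)) x acc ∨ y ∈ xs := by
      rw [PySem.List.mem_insertBy]
      rcases hy with hy | hy
      · exact Or.inl (Or.inr hy)
      · rcases List.mem_cons.mp hy with rfl | hy
        · exact Or.inl (Or.inl rfl)
        · exact Or.inr hy
    exact ih _ hacc' m hm y hy'

-- every emotion produced by the tag table is one of the five priority emotions
lemma mem_pvPriority_of_mapped2 (tags : List String) :
    ∀ s ∈ pvA_mapped2 tags, s ∈ pvPriority := by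
  intro s hs
  simp only [pvA_mapped2, pvA_mapped, List.mem_filterMap, List.mem_map] at hs
  obtain ⟨m, ⟨⟨tag, -, rfl⟩, hg⟩⟩ := hs
  cases h : pvTAG.get? (PySem.Str.lower tag) with
  | none => rw [h] at hg; simp at hg
  | some v =>
    rw [h] at hg
    have hv : (PySem.Str.lower tag, v) ∈ pvTAG.items :=
      PySem.Dict.mem_items_of_get?_eq_some _ h
    have hmap : v ∈ pvTAG.items.map (·.2) := List.mem_map_of_mem hv
    have hvals : pvTAG.items.map (·.2) =
        ["rage","rage","anger","anger","anger","humor","regret","regret","regret",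
         "respect","respect","respect"] := by decide
    rw [hvals] at hmap
    by_cases he : v = ""
    · simp [he] at hg
    · simp [he] at hg
      subst hg
      simp [pvPriority] at hmap ⊢
      tauto

-- B's counting loop builds exactly Counter(mapped)
lemma pvB_counts_eq (tags : List String) :
    pvB_counts tags = PySem.Dict.counter (pvA_mapped2 tags) := by
  rw [← PySem.Dict.foldl_insert_getD_add_one_eq_counter]
  unfold pvB_counts
  suffices h : ∀ (ts : List String) (d : PySem.Dict String Int),
      ts.foldl (fun d tag =>
        match pvTAG.get? (PySem.Str.lower tag) with
        | some e => if e ≠ "" then d.insert e (d.getD e 0 + 1) else d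
        | none => d) d
      = (pvA_mapped2 ts).foldl (fun d x => d.insert x (d.getD x 0 + 1)) d from h tags _
  intro ts
  induction ts with
  | nil => intro d; rfl
  | cons t ts ih =>
    intro d
    simp only [List.foldl_cons, pvA_mapped2, pvA_mapped, List.map_cons, List.filterMap_cons]
    cases h : pvTAG.get? (PySem.Str.lower t) with
    | none => simpa [pvA_mapped2, pvA_mapped] using ih d
    | some e =>
      by_cases he : e = ""
      · subst he; simpa [pvA_mapped2, pvA_mapped] using ih d
      · simpa [he, pvA_mapped2, pvA_mapped] using ih _

lemma counter_size_eq_zero_iff (l : List String) :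
    (PySem.Dict.counter l).size = 0 ↔ l = [] := by
  constructor
  · intro h
    cases l with
    | nil => rfl
    | cons x xs =>
      exfalso
      have hx : x ∈ (PySem.Dict.counter (x :: xs)).keys := by
        rw [PySem.Dict.keys_counter]
        rw [PySem.Set.mem_ofList]
        exact List.mem_cons_self
      have hne : (PySem.Dict.counter (x :: xs)).items.map (·.1) ≠ [] := by
        intro hnil
        rw [show (PySem.Dict.counter (x :: xs)).items.map (·.1)
              = (PySem.Dict.counter (x :: xs)).keys from rfl] at hnil
        rw [hnil] at hx
        simp at hx
      have hlen : (PySem.Dict.counter (x :: xs)).items ≠ [] := by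
        intro hnil; exact hne (by rw [hnil]; rfl)
      unfold PySem.Dict.size at h
      exact hlen (List.eq_nil_of_length_eq_zero h)
  · intro h; subst h; rfl

set_option maxHeartbeats 1600000 in
lemma pvAB (tags : List String) : pvA_body tags = pvB_body tags := by
  by_cases hnil : pvA_mapped2 tags = []
  · simp only [pvA_body, pvB_body, pvB_counts_eq, hnil, counter_size_eq_zero_iff]
    simp
  · simp only [pvA_body, pvB_body, pvB_counts_eq, counter_size_eq_zero_iff, hnil,
      if_false, sorted2_eq_foldlK]
    set l := pvA_mapped2 tags with hl
    -- A side: the head of the insertion-sorted keys is pvK-minimal among the keys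
    obtain ⟨x, xs, hx⟩ : ∃ x xs, l = x :: xs := by
      cases hc : l with
      | nil => exact absurd hc hnil
      | cons a b => exact ⟨a, b, rfl⟩
    have hkeys : (PySem.Dict.counter l).keys = PySem.Set.ofList l := PySem.Dict.keys_counter l
    have hxk : x ∈ (PySem.Dict.counter l).keys := by
      rw [hkeys, PySem.Set.mem_ofList, hx]; exact List.mem_cons_self
    have hxs : x ∈ (PySem.Dict.counter l).keys.foldl
        (fun acc y => PySem.List.insertBy (fun a b => decide (pvK l a < pvK l b)) y acc) [] :=
      (mem_foldl_insertBy _ _ _ _).mpr (Or.inr hxk)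
    obtain ⟨m, t, hm⟩ : ∃ m t, (PySem.Dict.counter l).keys.foldl
        (fun acc y => PySem.List.insertBy (fun a b => decide (pvK l a < pvK l b)) y acc) [] = m :: t := by
      cases hc : (PySem.Dict.counter l).keys.foldl
          (fun acc y => PySem.List.insertBy (fun a b => decide (pvK l a < pvK l b)) y acc) [] with
      | nil => rw [hc] at hxs; simp at hxs
      | cons a b => exact ⟨a, b, rfl⟩
    have hhead : ((PySem.Dict.counter l).keys.foldl
        (fun acc y => PySem.List.insertBy (fun a b => decide (pvK l a < pvK l b)) y acc) []).head? = some m := by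
      rw [hm]; rfl
    have hmk : m ∈ (PySem.Dict.counter l).keys := by
      have : m ∈ (PySem.Dict.counter l).keys.foldl
          (fun acc y => PySem.List.insertBy (fun a b => decide (pvK l a < pvK l b)) y acc) [] := by
        rw [hm]; exact List.mem_cons_self
      rcases (mem_foldl_insertBy _ _ _ _).mp this with h | h
      · simp at h
      · exact h
    have hml : m ∈ l := by rwa [hkeys, PySem.Set.mem_ofList] at hmk
    have hminK : ∀ y ∈ l, pvK l m ≤ pvK l y := by
      intro y hy
      refine foldl_insertBy_head_min (pvK l) (PySem.Dict.counter l).keys [] ?_ m hhead y ?_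
      · intro m' hm' z hz; simp at hz
      · exact Or.inr (by rw [hkeys, PySem.Set.mem_ofList]; exact hy)
    rw [hm]
    have hget : PySem.List.pyGet? (m :: t) 0 = some m := by
      rw [show (0 : Int) = ((0 : Nat) : Int) from rfl, PySem.List.pyGet?_natCast]
      rfl
    rw [hget]
    -- count and key facts for the five emotions
    have hkey : ∀ e, l.count e = 0 ∨ pvK l m ≤ pvK l e := by
      intro e
      by_cases hel : e ∈ l
      · exact Or.inr (hminK e hel)
      · exact Or.inl (List.count_eq_zero.mpr hel)
    have hcm : 1 ≤ l.count m := List.count_pos_iff.mpr hml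
    have hm5 : m ∈ pvPriority := mem_pvPriority_of_mapped2 tags m (hl ▸ hml)
    have i0 : pvIdx "rage" = 0 := by decide
    have i1 : pvIdx "anger" = 1 := by decide
    have i2 : pvIdx "humor" = 2 := by decide
    have i3 : pvIdx "regret" = 3 := by decide
    have i4 : pvIdx "respect" = 4 := by decide
    have h0 := hkey "rage"
    have h1 := hkey "anger"
    have h2 := hkey "humor"
    have h3 := hkey "regret"
    have h4 := hkey "respect"
    -- unfold B's five-step scan
    simp only [pvPriority, List.foldl_cons, List.foldl_nil, PySem.Dict.getD_counter]
    simp only [pvPriority] at hm5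
    have hm5' : m = "rage" ∨ m = "anger" ∨ m = "humor" ∨ m = "regret" ∨ m = "respect" := by
      simpa using hm5
    rcases hm5' with rfl | rfl | rfl | rfl | rfl <;>
      simp only [pvK, i0, i1, i2, i3, i4] at h0 h1 h2 h3 h4 <;>
      split_ifs <;> first | rfl | (exfalso; omega)

-- ===== VERDICT (by name: the statement is the Claim_ definition above) =====
theorem infer_emotion_from_tags_spec : Claim_equal_infer_emotion_from_tags := by
  intro tags fallback _
  unfold Spec_infer_emotion_from_tags infer_emotion_from_tags infer_emotion_from_tags_alt
  cases fallback with
  | none => exact pvAB tags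
  | some f =>
    by_cases hf : f = "" <;> simp [hf, pvAB tags]
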